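-- pv_equiv track=rewrite | github.com/yishuitong/similar_requests | Multi_requests_matrix_mahaton.py | get_row_min
-- ===== SOURCE A (Python) =====
-- def get_row_min(matrix):
--     min_list = []
--     for row in matrix:
--         row_values = [val for val in row if val != 2]
--         if row_values:
--             min_value = min(row_values)
--             min_index = row_values.index(min_value)
--             min_list.append([min_value, min_index])
--     return min_list
-- ===== SOURCE B (Python) =====
-- def get_row_min(matrix):
--     min_list = []
--     for row in matrix:
--         min_value = None
--         min_index = -1
--         cnt = 0
--         for val in row:
--             if val != 2:
--                 if min_value is None or val < min_value:
--                     min_value = val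
--                     min_index = cnt
--                 cnt += 1
--         if min_value is not None:
--             min_list.append([min_value, min_index])
--     return min_list
-- ===== Notes on version B (the rewrite author's own statement) =====
-- stated objective: alternative
-- what changed: Each row is processed in a single fused pass maintaining a running minimum, its index among non-2 values, and a non-2 counter, instead of materializing the filtered list and then scanning it twice more with min() and .index().
import Mathlib
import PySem

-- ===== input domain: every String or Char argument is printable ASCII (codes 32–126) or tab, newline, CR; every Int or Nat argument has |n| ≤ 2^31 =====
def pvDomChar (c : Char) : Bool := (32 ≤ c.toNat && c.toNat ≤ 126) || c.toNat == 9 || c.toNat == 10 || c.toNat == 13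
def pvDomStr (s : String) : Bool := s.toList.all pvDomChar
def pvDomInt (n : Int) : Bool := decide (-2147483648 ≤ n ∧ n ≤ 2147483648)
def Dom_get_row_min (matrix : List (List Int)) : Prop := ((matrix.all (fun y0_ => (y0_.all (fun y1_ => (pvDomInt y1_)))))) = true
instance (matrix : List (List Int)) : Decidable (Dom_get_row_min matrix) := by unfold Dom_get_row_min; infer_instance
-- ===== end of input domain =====

-- B replaces A's three scans per row (filter into a new list, min(), .index()) by one
-- fused pass keeping a running minimum, its filtered-list index and a non-2 counter
-- (objective: alternative single-pass decomposition).

-- ===== PORT A =====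
-- one row of A's loop: build row_values = [val for val in row if val != 2],
-- then min(row_values) and row_values.index(min_value)
def pvRowA (min_list : List (List Int)) (row : List Int) : List (List Int) :=
  let row_values := row.filter (fun val => val != 2)
  if row_values.isEmpty then min_list
  else
    match PySem.List.min? row_values (fun x => x) with
    | none => min_list            -- unreachable: row_values nonempty
    | some min_value =>
      match PySem.List.index? row_values min_value with
      | none => min_list          -- unreachable: min_value ∈ row_values
      | some min_index => min_list ++ [[min_value, (min_index : Int)]]

def get_row_min (matrix : List (List Int)) : List (List Int) :=
  matrix.foldl pvRowA []

-- ===== PORT B =====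
-- B's inner-loop step: state = (optional (min_value, min_index), counter of non-2 values)
def pvStepB (st : Option (Int × Int) × Int) (val : Int) : Option (Int × Int) × Int :=
  if val ≠ 2 then
    match st.1 with
    | none => (some (val, st.2), st.2 + 1)
    | some (m, i) => (if val < m then some (val, st.2) else some (m, i), st.2 + 1)
  else st

def pvRowB (min_list : List (List Int)) (row : List Int) : List (List Int) :=
  match (row.foldl pvStepB (none, 0)).1 with
  | none => min_list
  | some (m, i) => min_list ++ [[m, i]]

def get_row_min_alt (matrix : List (List Int)) : List (List Int) :=
  matrix.foldl pvRowB []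

-- ===== PRECONDITION & SPEC =====
def Spec_get_row_min (matrix : List (List Int)) (out : List (List Int)) : Prop := out = get_row_min_alt matrix
instance (matrix : List (List Int)) (out : List (List Int)) : Decidable (Spec_get_row_min matrix out) := by unfold Spec_get_row_min; infer_instance

-- ===== CLAIM (what is proved, stated in full; the proofs are below) =====
def Claim_equal_get_row_min : Prop := ∀ (matrix : List (List Int)), Dom_get_row_min matrix → Spec_get_row_min matrix (get_row_min matrix)

-- ===== LEMMAS AND PROOFS =====

-- reference: minimum value of a list together with the index of its first occurrence
def pvMinIdx : List Int → Option (Int × Nat)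
  | [] => none
  | x :: xs =>
    match pvMinIdx xs with
    | none => some (x, 0)
    | some (m, i) => if x ≤ m then some (x, 0) else some (m, i + 1)

theorem pvMinIdx_eq_none_iff (l : List Int) : pvMinIdx l = none ↔ l = [] := by
  cases l with
  | nil => simp [pvMinIdx]
  | cons x xs =>
    simp only [pvMinIdx]
    cases pvMinIdx xs with
    | none => simp
    | some p => cases p with | mk m i => by_cases h : x ≤ m <;> simp [h]

-- the running min of A's min? equals pvMinIdx's value component
theorem pvFoldlMin_eq (xs : List Int) : ∀ x : Int,
    xs.foldl min x = (match pvMinIdx xs with | none => x | some p => min x p.1) := by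
  induction xs with
  | nil => intro x; simp [pvMinIdx]
  | cons y ys ih =>
    intro x
    simp only [List.foldl_cons, ih (min x y), pvMinIdx]
    cases hys : pvMinIdx ys with
    | none => simp
    | some p =>
      cases p with
      | mk m i =>
        by_cases h : y ≤ m
        · simp only [h, if_pos]
          rw [min_assoc, min_eq_left h]
        · simp only [h, if_false]
          rw [min_assoc, min_eq_right (show m ≤ y by omega)]

-- pvMinIdx's index component is the first occurrence of its value component
theorem pvIndex_minIdx (l : List Int) : ∀ m i, pvMinIdx l = some (m, i) →
    PySem.List.index? l m = some i := by
  induction l with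
  | nil => intro m i h; simp [pvMinIdx] at h
  | cons x xs ih =>
    intro m i h
    simp only [pvMinIdx] at h
    cases hxs : pvMinIdx xs with
    | none =>
      rw [hxs] at h
      simp only [Option.some.injEq, Prod.mk.injEq] at h
      obtain ⟨rfl, rfl⟩ := h
      exact PySem.List.index?_cons_self x xs
    | some p =>
      cases p with
      | mk m' i' =>
        rw [hxs] at h
        by_cases hle : x ≤ m'
        · simp only [hle, if_pos, Option.some.injEq, Prod.mk.injEq] at h
          obtain ⟨rfl, rfl⟩ := h
          exact PySem.List.index?_cons_self x xs
        · simp only [hle, if_false, Option.some.injEq, Prod.mk.injEq] at h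
          obtain ⟨rfl, rfl⟩ := h
          rw [PySem.List.index?_cons_of_ne xs (by omega), ih _ _ hxs]
          rfl

-- A's row body computes pvMinIdx of the filtered row
theorem pvRowA_eq (min_list : List (List Int)) (row : List Int) :
    pvRowA min_list row =
      (match pvMinIdx (row.filter (fun val => val != 2)) with
       | none => min_list
       | some p => min_list ++ [[p.1, (p.2 : Int)]]) := by
  unfold pvRowA
  cases hl : row.filter (fun val => val != 2) with
  | nil => simp [pvMinIdx]
  | cons x xs =>
    simp only [List.isEmpty_cons, if_neg, Bool.false_eq_true, not_false_eq_true,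
      PySem.List.min?_id_cons]
    have hfold := pvFoldlMin_eq xs x
    cases hmi : pvMinIdx (x :: xs) with
    | none => rw [pvMinIdx_eq_none_iff] at hmi; simp at hmi
    | some p =>
      cases p with
      | mk m i =>
        have hv : xs.foldl min x = m := by
          simp only [pvMinIdx] at hmi
          cases hxs : pvMinIdx xs with
          | none =>
            rw [hxs] at hmi hfold
            simp only [Option.some.injEq, Prod.mk.injEq] at hmi
            simp only at hfold
            omega
          | some q =>
            cases q with
            | mk m' i' =>
              rw [hxs] at hmi hfold
              simp only at hfold
              rw [hfold]
              by_cases h : x ≤ m'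
              · simp only [h, if_pos, Option.some.injEq, Prod.mk.injEq] at hmi
                rw [min_eq_left h, hmi.1]
              · simp only [h, if_false, Option.some.injEq, Prod.mk.injEq] at hmi
                rw [min_eq_right (by omega), hmi.1]
        rw [hv, pvIndex_minIdx (x :: xs) m i hmi]

-- B's fold skips 2s: folding over row = folding over the filtered row
theorem pvStepB_filter (row : List Int) : ∀ st,
    row.foldl pvStepB st = (row.filter (fun val => val != 2)).foldl pvStepB st := by
  induction row with
  | nil => intro st; rfl
  | cons x xs ih =>
    intro st
    by_cases h : x = 2
    · subst h
      simp only [List.filter_cons, List.foldl_cons, ih]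
      simp [pvStepB]
    · simp only [List.filter_cons, List.foldl_cons, ih]
      simp [h]

-- running B's step from an established minimum over a 2-free list
theorem pvStepB_some (l : List Int) (h2 : ∀ v ∈ l, v ≠ 2) : ∀ (m i c : Int),
    l.foldl pvStepB (some (m, i), c) =
      ((match pvMinIdx l with
        | none => some (m, i)
        | some p => if p.1 < m then some (p.1, c + (p.2 : Int)) else some (m, i)),
       c + (l.length : Int)) := by
  induction l with
  | nil => intro m i c; simp [pvMinIdx]
  | cons y ys ih =>
    intro m i c
    have hy : y ≠ 2 := h2 y (by simp)
    have h2' : ∀ v ∈ ys, v ≠ 2 := fun v hv => h2 v (by simp [hv])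
    simp only [List.foldl_cons, pvStepB, if_pos hy, pvMinIdx]
    by_cases hlt : y < m
    · simp only [if_pos hlt, ih h2' y c (c + 1)]
      cases hys : pvMinIdx ys with
      | none =>
        rw [pvMinIdx_eq_none_iff] at hys; subst hys
        simp [hlt]
      | some q =>
        cases q with
        | mk m' i' =>
          by_cases hle : y ≤ m'
          · have : ¬ m' < y := by omega
            simp only [hle, if_pos, this, if_false]
            simp [hlt]
            omega
          · have hm'a : m' < y := by omega
            have hm'm : m' < m := by omega
            simp only [hle, if_false, hm'a, if_pos, hm'm]
            simp
            constructor
            · omega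
            · omega
    · simp only [if_neg hlt, ih h2' m i (c + 1)]
      cases hys : pvMinIdx ys with
      | none =>
        rw [pvMinIdx_eq_none_iff] at hys; subst hys
        simp [hlt]
      | some q =>
        cases q with
        | mk m' i' =>
          by_cases hle : y ≤ m'
          · have hym : ¬ y < m := hlt
            simp only [hle, if_pos]
            simp [hlt]
            omega
          · have hm' : m' < y := by omega
            simp only [hle, if_false]
            by_cases hmm : m' < m
            · simp [hmm]
              constructor; omega; omega
            · simp [hmm]
              omega

-- B's row body also computes pvMinIdx of the filtered row
theorem pvRowB_eq (min_list : List (List Int)) (row : List Int) :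
    pvRowB min_list row =
      (match pvMinIdx (row.filter (fun val => val != 2)) with
       | none => min_list
       | some p => min_list ++ [[p.1, (p.2 : Int)]]) := by
  unfold pvRowB
  rw [pvStepB_filter]
  have h2 : ∀ v ∈ row.filter (fun val => val != 2), v ≠ 2 := by
    intro v hv
    simp only [List.mem_filter, bne_iff_ne, ne_eq] at hv
    exact hv.2
  cases hl : row.filter (fun val => val != 2) with
  | nil => simp [pvMinIdx]
  | cons x xs =>
    rw [hl] at h2
    have hx : x ≠ 2 := h2 x (by simp)
    have h2' : ∀ v ∈ xs, v ≠ 2 := fun v hv => h2 v (by simp [hv])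
    simp only [List.foldl_cons, pvStepB, if_pos hx]
    rw [pvStepB_some xs h2' x 0 (0 + 1)]
    simp only [pvMinIdx]
    cases hxs : pvMinIdx xs with
    | none => simp
    | some q =>
      cases q with
      | mk m' i' =>
        by_cases hle : x ≤ m'
        · have : ¬ m' < x := by omega
          simp [hle, this]
        · have hm' : m' < x := by omega
          simp [hle, hm']
          omega

theorem pvRow_eq : pvRowA = pvRowB := by
  funext min_list row
  rw [pvRowA_eq, pvRowB_eq]

-- ===== VERDICT (by name: the statement is the Claim_ definition above) =====
theorem get_row_min_spec : Claim_equal_get_row_min := by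
  intro matrix _
  unfold Spec_get_row_min get_row_min get_row_min_alt
  rw [pvRow_eq]
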